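-- pv_equiv track=rewrite | github.com/flowerett/aoc | 2022/python/day18.py | find_air
-- ===== SOURCE A (Python) =====
-- def find_air(cubes, dim):
--     xm, ym, zm = dim
--     air = set()
--
--     for xi in range(1, xm+1):
--         for yi in range(1, ym+1):
--             for zi in range(1, zm+1):
--                 if (xi, yi, zi) not in cubes:
--                     air.add((xi, yi, zi))
--
--     return air
-- ===== SOURCE B (Python) =====
-- def find_air(cubes, dim):
--     xm, ym, zm = dim
--     cells = dict.fromkeys((x, y, z)
--                           for x in range(1, xm + 1)
--                           for y in range(1, ym + 1)
--                           for z in range(1, zm + 1))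
--     for c in cubes:
--         cells.pop(c, None)
--     return {c for c in cells}
-- ===== Notes on version B (the rewrite author's own statement) =====
-- stated objective: alternative
-- what changed: Instead of A's triple loop that tests every cell against cubes and conditionally adds it, B builds the full bounding-box cell index once (dict.fromkeys over the product of the three ranges), deletes each cube from it with one pop per cube, and returns the remaining keys as a set — subtraction costs O(|cubes|) pops instead of one membership test per cell.
import Mathlib
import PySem

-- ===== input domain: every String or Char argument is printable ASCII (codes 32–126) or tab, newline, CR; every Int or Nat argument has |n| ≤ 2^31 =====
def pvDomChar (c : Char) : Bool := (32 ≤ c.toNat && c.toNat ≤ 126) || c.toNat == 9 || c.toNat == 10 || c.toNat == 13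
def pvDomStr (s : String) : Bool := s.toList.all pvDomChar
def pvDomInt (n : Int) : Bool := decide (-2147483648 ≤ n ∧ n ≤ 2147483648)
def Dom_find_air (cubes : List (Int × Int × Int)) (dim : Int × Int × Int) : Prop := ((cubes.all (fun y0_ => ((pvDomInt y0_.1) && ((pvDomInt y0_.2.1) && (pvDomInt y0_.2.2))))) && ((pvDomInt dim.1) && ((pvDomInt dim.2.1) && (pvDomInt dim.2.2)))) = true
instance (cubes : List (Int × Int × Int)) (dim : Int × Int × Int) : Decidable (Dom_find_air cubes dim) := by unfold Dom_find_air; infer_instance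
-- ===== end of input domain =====

-- B builds the full bounding-box cell index once (dict.fromkeys over the product of the three
-- ranges), deletes each cube with one pop, and returns the remaining keys as a set, instead of
-- A's triple loop with a per-cell membership guard.


-- ===== PORT A =====
-- triple nested for-loop, per-cell 'not in cubes' guard, air.add
def find_air (cubes : List (Int × Int × Int)) (dim : Int × Int × Int) : List (Int × Int × Int) :=
  (PySem.List.pyRange 1 (dim.1 + 1) 1).foldl (fun air xi =>
    (PySem.List.pyRange 1 (dim.2.1 + 1) 1).foldl (fun air yi =>
      (PySem.List.pyRange 1 (dim.2.2 + 1) 1).foldl (fun air zi =>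
        if !(cubes.contains (xi, yi, zi)) then PySem.Set.add air (xi, yi, zi) else air)
        air) air) PySem.Set.empty

-- ===== PORT B =====
-- dict.fromkeys over the product generator is a key-insert fold into an empty Dict (values are
-- Python's None, irrelevant: only keys are read — modelled as Unit); the generator's enumeration
-- order is exactly flatMap/map; cells.pop(c, None) is Dict.erase (pop with a default never
-- raises); the final set comprehension over the dict's keys is Set.ofList of its key list.
def find_air_alt (cubes : List (Int × Int × Int)) (dim : Int × Int × Int) : List (Int × Int × Int) :=
  let cells : PySem.Dict (Int × Int × Int) Unit :=
    ((PySem.List.pyRange 1 (dim.1 + 1) 1).flatMap (fun x =>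
      (PySem.List.pyRange 1 (dim.2.1 + 1) 1).flatMap (fun y =>
        (PySem.List.pyRange 1 (dim.2.2 + 1) 1).map (fun z => (x, y, z))))).foldl
      (fun d c => d.insert c ()) PySem.Dict.empty
  let cells := cubes.foldl (fun d c => d.erase c) cells
  PySem.Set.ofList cells.keys

-- ===== PRECONDITION & SPEC =====
def Spec_find_air (cubes : List (Int × Int × Int)) (dim : Int × Int × Int) (out : List (Int × Int × Int)) : Prop := out = find_air_alt cubes dim
instance (cubes : List (Int × Int × Int)) (dim : Int × Int × Int) (out : List (Int × Int × Int)) : Decidable (Spec_find_air cubes dim out) := by unfold Spec_find_air; infer_instance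

-- ===== CLAIM (what is proved, stated in full; the proofs are below) =====
def Claim_equal_find_air : Prop := ∀ (cubes : List (Int × Int × Int)) (dim : Int × Int × Int), Dom_find_air cubes dim → Spec_find_air cubes dim (find_air cubes dim)

-- ===== LEMMAS AND PROOFS =====

-- first-occurrence dedup commutes with a filter: generalized to an arbitrary accumulator
theorem foldl_add_filter {α : Type} [BEq α] [LawfulBEq α] (q : α → Bool) (l acc : List α) :
    (l.foldl PySem.Set.add acc).filter q = (l.filter q).foldl PySem.Set.add (acc.filter q) := by
  induction l generalizing acc with
  | nil => rfl
  | cons x t ih =>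
    simp only [List.foldl_cons, List.filter_cons]
    by_cases hm : x ∈ acc
    · by_cases hq : q x = true
      · simp [PySem.Set.add, hm, hq, ih, List.mem_filter]
      · simp [PySem.Set.add, hm, hq, ih]
    · by_cases hq : q x = true
      · simp [PySem.Set.add, hm, hq, ih, List.mem_filter, List.filter_append]
      · simp [PySem.Set.add, hm, hq, ih, List.filter_append]

theorem ofList_filter {α : Type} [BEq α] [LawfulBEq α] (q : α → Bool) (l : List α) :
    PySem.Set.ofList (l.filter q) = (PySem.Set.ofList l).filter q := by
  simpa [PySem.Set.ofList, PySem.Set.empty] using (foldl_add_filter q l []).symm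

-- A's guarded triple loop IS the conditional fold over the product list
theorem find_air_eq_product_fold (cubes : List (Int × Int × Int)) (dim : Int × Int × Int) :
    find_air cubes dim =
      ((PySem.List.pyRange 1 (dim.1 + 1) 1).flatMap (fun x =>
        (PySem.List.pyRange 1 (dim.2.1 + 1) 1).flatMap (fun y =>
          (PySem.List.pyRange 1 (dim.2.2 + 1) 1).map (fun z => (x, y, z))))).foldl
        (fun air c => if !(cubes.contains c) then PySem.Set.add air c else air) PySem.Set.empty := by
  simp [find_air, List.foldl_flatMap, List.foldl_map]

-- erasing each element of 'cubes' from a dict leaves exactly the keys not in 'cubes'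
theorem keys_foldl_erase {κ : Type} [BEq κ] [LawfulBEq κ] (cubes : List κ)
    {ν : Type} (d : PySem.Dict κ ν) :
    (cubes.foldl (fun d c => d.erase c) d).keys = d.keys.filter (fun k => !cubes.contains k) := by
  induction cubes generalizing d with
  | nil => simp
  | cons c t ih =>
    rw [List.foldl_cons, ih]
    show List.filter _ (List.map _ (List.filter _ d.items)) = List.filter _ (List.map _ d.items)
    simp only [List.filter_map, List.filter_filter]
    refine congrArg (List.map _) (List.filter_congr fun p _ => ?_)
    simp only [Function.comp, List.contains_cons]
    by_cases h : p.1 = c <;> simp [h, Bool.and_comm]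

theorem find_air_spec_aux (cubes : List (Int × Int × Int)) (dim : Int × Int × Int) :
    find_air cubes dim = find_air_alt cubes dim := by
  have hP : ∀ P : List (Int × Int × Int),
      P.foldl (fun air c => if !(cubes.contains c) then PySem.Set.add air c else air)
        PySem.Set.empty =
      PySem.Set.ofList
        ((cubes.foldl (fun d c => d.erase c)
          (P.foldl (fun d c => d.insert c ()) (PySem.Dict.empty : PySem.Dict (Int × Int × Int) Unit))).keys) := by
    intro P
    rw [PySem.List.foldl_if_eq_foldl_filter (p := fun c => !(cubes.contains c))
        (f := PySem.Set.add) (init := PySem.Set.empty)]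
    rw [keys_foldl_erase, PySem.Dict.keys_foldl_insert]
    have hkeys : PySem.Set.update (PySem.Dict.empty : PySem.Dict (Int × Int × Int) Unit).keys P
        = PySem.Set.ofList P := rfl
    rw [hkeys,
      PySem.Set.ofList_eq_self_of_nodup
        (List.filter (fun k => !cubes.contains k) (PySem.Set.ofList P))
        (List.Nodup.filter (fun k => !cubes.contains k) (PySem.Set.nodup_ofList P))]
    exact ofList_filter (fun k => !cubes.contains k) P
  rw [find_air_eq_product_fold, find_air_alt]
  exact hP _

-- ===== VERDICT (by name: the statement is the Claim_ definition above) =====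
theorem find_air_spec : Claim_equal_find_air := by
  intro cubes dim _
  exact find_air_spec_aux cubes dim
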